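-- pv_equiv track=rewrite | github.com/geo-han-ca/music_api_v2 | app/functional_tests/tests.py | __CountArtists
-- ===== SOURCE A (Python) =====
-- def __CountArtists(allFiles):
--
--     raw_music_directory_contents = allFiles
--
--     artists = []
--     for file_path in raw_music_directory_contents:
--
--         if ".mp3" not in file_path.lower():
--             continue
--
--         artist = {file_path[2:].split('/')[0]}
--
--         if artist not in artists:
--             artists.append(artist)
--
--
--     return len(artists)
-- ===== SOURCE B (Python) =====
-- def __CountArtists(allFiles):
--     # one pass to extract names, then sort and count group boundaries
--     names = [f[2:].split('/')[0] for f in allFiles if ".mp3" in f.lower()]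
--     names.sort()
--     count = 0
--     prev = None
--     for x in names:
--         if prev is None or x != prev:
--             count += 1
--         prev = x
--     return count
-- ===== Notes on version B (the rewrite author's own statement) =====
-- stated objective: alternative
-- what changed: A dedups by scanning its accumulator list for every kept file (repeated membership test); B extracts all artist names in one pass, sorts them, and counts group boundaries in a single scan of the sorted list.
import Mathlib
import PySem

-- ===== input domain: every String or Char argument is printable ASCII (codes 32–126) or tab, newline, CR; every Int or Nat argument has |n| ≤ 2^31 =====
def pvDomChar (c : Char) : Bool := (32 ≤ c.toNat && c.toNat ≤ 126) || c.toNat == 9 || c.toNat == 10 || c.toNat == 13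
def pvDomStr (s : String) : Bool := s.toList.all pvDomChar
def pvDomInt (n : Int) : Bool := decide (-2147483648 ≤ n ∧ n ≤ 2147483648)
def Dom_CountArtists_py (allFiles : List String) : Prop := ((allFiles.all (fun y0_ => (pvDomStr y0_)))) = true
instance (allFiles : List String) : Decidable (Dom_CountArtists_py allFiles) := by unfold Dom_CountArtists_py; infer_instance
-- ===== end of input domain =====

-- B replaces A's quadratic membership-scan dedup with a single extraction pass followed by
-- sort + one grouping pass (alternative decomposition; not measurably faster at tested sizes).

-- shared expressions of both Pythons: the '.mp3' filter and 'file_path[2:].split('/')[0]'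
def pvKeep (fp : String) : Bool := PySem.Str.isIn ".mp3" (PySem.Str.lower fp)
def pvArtist (fp : String) : String :=
  ((PySem.Str.split? (PySem.Str.slice fp (some 2) none) "/").getD []).headD ""  -- sep "/" ≠ "" so split? = some; split never returns [], so [0] = headD ""

-- ===== PORT A =====
-- Python's one-element set {name} is PySem.Set.ofList [name]; '==' on such sets is equality of the names.
def CountArtists_py (allFiles : List String) : Int :=
  ((allFiles.foldl (fun (artists : List (PySem.Set String)) fp =>
      if pvKeep fp then
        let artist : PySem.Set String := PySem.Set.ofList [pvArtist fp]
        if artists.contains artist then artists else artists ++ [artist]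
      else artists) []).length : Int)

-- ===== PORT B =====
def CountArtists_py_alt (allFiles : List String) : Int :=
  let names := (allFiles.filter pvKeep).map pvArtist
  let srt := PySem.List.sorted names (fun x => x) false
  (srt.foldl (fun (st : Int × Option String) x =>
      (if st.2 = some x then st.1 else st.1 + 1, some x)) (0, none)).1

-- ===== PRECONDITION & SPEC =====
def Spec_CountArtists_py (allFiles : List String) (out : Int) : Prop := out = CountArtists_py_alt allFiles
instance (allFiles : List String) (out : Int) : Decidable (Spec_CountArtists_py allFiles out) := by unfold Spec_CountArtists_py; infer_instance

-- ===== CLAIM (what is proved, stated in full; the proofs are below) =====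
def Claim_equal_CountArtists_py : Prop := ∀ (allFiles : List String), Dom_CountArtists_py allFiles → Spec_CountArtists_py allFiles (CountArtists_py allFiles)

-- ===== LEMMAS AND PROOFS =====

-- names extracted from the kept files (used only in the proofs)
def pvNames (allFiles : List String) : List String := (allFiles.filter pvKeep).map pvArtist

-- A's accumulator step is exactly PySem.Set.add on the singleton
lemma A_step_eq (artists : List (PySem.Set String)) (fp : String) :
    (let artist : PySem.Set String := PySem.Set.ofList [pvArtist fp]
     if artists.contains artist then artists else artists ++ [artist]) =
    PySem.Set.add artists (PySem.Set.ofList [pvArtist fp]) := by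
  simp [PySem.Set.add, PySem.Set.contains]

-- length of set(xs) is the cardinality of xs's elements
lemma ofList_length_eq_card {α : Type} [BEq α] [LawfulBEq α] [DecidableEq α] (l : List α) :
    (PySem.Set.ofList l).length = l.toFinset.card := by
  have hnd : (PySem.Set.ofList l).Nodup := PySem.Set.nodup_ofList l
  have : (PySem.Set.ofList l).toFinset = l.toFinset := by
    ext x; simp [List.mem_toFinset, PySem.Set.mem_ofList]
  rw [← List.toFinset_card_of_nodup hnd, this]

-- A counts the distinct extracted names
lemma A_eq_card (allFiles : List String) :
    CountArtists_py allFiles = ((pvNames allFiles).toFinset.card : Int) := by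
  unfold CountArtists_py
  rw [PySem.List.foldl_if_eq_foldl_filter]
  have h1 : (allFiles.filter pvKeep).foldl
      (fun (artists : List (PySem.Set String)) fp =>
        let artist : PySem.Set String := PySem.Set.ofList [pvArtist fp]
        if artists.contains artist then artists else artists ++ [artist]) [] =
      PySem.Set.ofList ((pvNames allFiles).map (fun n => [n])) := by
    rw [PySem.Set.ofList_eq_foldl]
    unfold pvNames
    rw [List.foldl_map, List.foldl_map]
    exact PySem.List.foldl_congr_mem _ _ _ _ (fun acc x _ => A_step_eq acc x)
  rw [h1, ofList_length_eq_card,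
      show ((pvNames allFiles).map (fun n => [n])).toFinset
          = (pvNames allFiles).toFinset.image (fun n => [n]) by ext x; simp,
      Finset.card_image_of_injective _ (fun a b h => by simpa using h)]

-- invariant of B's grouping loop over a sorted list
lemma B_loop (s : List String) (hs : s.Pairwise (· ≤ ·)) :
    ∀ (c : Int) (prev : Option String),
      (∀ y ∈ s, ∀ p, prev = some p → p ≤ y) →
      (s.foldl (fun (st : Int × Option String) x =>
          (if st.2 = some x then st.1 else st.1 + 1, some x)) (c, prev)).1 =
        c + ((s.toFinset \ prev.toFinset).card : Int) := by
  induction s with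
  | nil => intro c prev _; simp
  | cons x t ih =>
    intro c prev hp
    rcases List.pairwise_cons.mp hs with ⟨hxle, ht⟩
    have ihx := ih ht (if prev = some x then c else c + 1) (some x)
      (fun y hy p hpq => by cases hpq; exact hxle y hy)
    simp only [List.foldl_cons]
    rw [ihx]
    by_cases hpx : prev = some x
    · subst hpx
      simp only [Option.toFinset_some, List.toFinset_cons,
        Finset.insert_sdiff_of_mem _ (Finset.mem_singleton_self x)]
      simp
    · -- prev is none or some p with p < x; then prev's element is not in x :: t
      have hdisj : Disjoint (insert x t.toFinset) prev.toFinset := by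
        cases prev with
        | none => simp
        | some p =>
          have hne : p ≠ x := fun h => hpx (by rw [h])
          have hplt : p < x := lt_of_le_of_ne (hp x (List.mem_cons_self) p rfl) hne
          have hpmem : p ∉ insert x t.toFinset := by
            simp only [Finset.mem_insert, List.mem_toFinset]
            push Not
            exact ⟨hne, fun hpt => absurd hplt (not_lt_of_ge (hxle p hpt))⟩
          simpa [Option.toFinset_some] using Finset.disjoint_singleton_right.mpr hpmem
      simp only [if_neg hpx, List.toFinset_cons,
        Finset.sdiff_eq_self_of_disjoint hdisj, Option.toFinset_some]
      rw [Finset.sdiff_singleton_eq_erase,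
        show insert x t.toFinset = insert x (t.toFinset.erase x) by
          ext y; by_cases hy : y = x <;> simp [hy],
        Finset.card_insert_of_notMem (Finset.notMem_erase x _)]
      push_cast; ring

-- B counts the distinct extracted names too
lemma B_eq_card (allFiles : List String) :
    CountArtists_py_alt allFiles = ((pvNames allFiles).toFinset.card : Int) := by
  simp only [CountArtists_py_alt]
  rw [show (allFiles.filter pvKeep).map pvArtist = pvNames allFiles from rfl]
  have hperm : (PySem.List.sorted (pvNames allFiles) (fun x => x) false).Perm (pvNames allFiles) :=
    PySem.List.sorted_perm _ _ _
  have hpw : (PySem.List.sorted (pvNames allFiles) (fun x => x) false).Pairwise (· ≤ ·) := by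
    simpa using PySem.List.sorted_pairwise (pvNames allFiles) (fun x => x)
  rw [B_loop _ hpw 0 none (by simp)]
  rw [List.toFinset_eq_of_perm _ _ hperm]
  simp

-- ===== VERDICT (by name: the statement is the Claim_ definition above) =====
theorem CountArtists_py_spec : Claim_equal_CountArtists_py := by
  intro allFiles _
  unfold Spec_CountArtists_py
  rw [A_eq_card, B_eq_card]
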